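-- pv_equiv track=rewrite | github.com/ibusnowden/munqib | dataprep.py | stats
-- ===== SOURCE A (Python) =====
-- from typing import Any, Dict, Iterator, List, Optional, Tuple
--
-- def _fmt_num(n: int) -> str:
--     return f"{n:,}"
--
-- def stats(docs: List[Dict[str, Any]], field: str = "text") -> str:
--     """Compute corpus statistics. Output matches the Rust stats tool format."""
--     lengths = []
--     for doc in docs:
--         text = doc.get(field) or ""
--         lengths.append(len(text))
--
--     if not lengths:
--         return "docs: 0\nchars: 0\ntokens: ~0  (chars / 4)\nlengths: no docs found"
--
--     count = len(lengths)
--     total_chars = sum(lengths)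
--     tokens = total_chars // 4
--     min_len = min(lengths)
--     max_len = max(lengths)
--     mean_len = total_chars // count
--
--     sorted_lens = sorted(lengths)
--     p50 = sorted_lens[len(sorted_lens) // 2]
--     p90 = sorted_lens[len(sorted_lens) * 9 // 10]
--
--     return (
--         f"docs:    {_fmt_num(count)}\n"
--         f"chars:   {_fmt_num(total_chars)}\n"
--         f"tokens:  ~{_fmt_num(tokens)}  (chars / 4)\n"
--         f"lengths: min={_fmt_num(min_len)}  mean={_fmt_num(mean_len)}"
--         f"  p50={_fmt_num(p50)}  p90={_fmt_num(p90)}  max={_fmt_num(max_len)}\n"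
--         f"format:  jsonl  field: {field}"
--     )
-- ===== SOURCE B (Python) =====
-- from typing import Any, Dict, List
--
-- def _fmt_num(n: int) -> str:
--     return f"{n:,}"
--
-- def stats(docs: List[Dict[str, Any]], field: str = "text") -> str:
--     """Corpus statistics via one pass + a length-frequency table (sorts only
--     the distinct lengths instead of the whole length list)."""
--     count = 0
--     total_chars = 0
--     freq = {}
--     for doc in docs:
--         text = doc.get(field) or ""
--         n = len(text)
--         count += 1
--         total_chars += n
--         freq[n] = freq.get(n, 0) + 1
--
--     if count == 0:
--         return "docs: 0\nchars: 0\ntokens: ~0  (chars / 4)\nlengths: no docs found"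
--
--     ks = sorted(freq)
--     min_len = ks[0]
--     max_len = ks[-1]
--     i50 = count // 2
--     i90 = count * 9 // 10
--     p50 = None
--     p90 = None
--     cum = 0
--     for k in ks:
--         cum += freq[k]
--         if p50 is None and cum > i50:
--             p50 = k
--         if p90 is None and cum > i90:
--             p90 = k
--
--     tokens = total_chars // 4
--     mean_len = total_chars // count
--     return (
--         f"docs:    {_fmt_num(count)}\n"
--         f"chars:   {_fmt_num(total_chars)}\n"
--         f"tokens:  ~{_fmt_num(tokens)}  (chars / 4)\n"
--         f"lengths: min={_fmt_num(min_len)}  mean={_fmt_num(mean_len)}"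
--         f"  p50={_fmt_num(p50)}  p90={_fmt_num(p90)}  max={_fmt_num(max_len)}\n"
--         f"format:  jsonl  field: {field}"
--     )
-- ===== Notes on version B (the rewrite author's own statement) =====
-- stated objective: alternative
-- what changed: B replaces A's build-list/sum/min/max/full-sort-and-index passes by one counting pass that accumulates count, total and a length-frequency dict, then sorts only the distinct lengths and finds min/max/p50/p90 by a cumulative-count scan over them.
import Mathlib
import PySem

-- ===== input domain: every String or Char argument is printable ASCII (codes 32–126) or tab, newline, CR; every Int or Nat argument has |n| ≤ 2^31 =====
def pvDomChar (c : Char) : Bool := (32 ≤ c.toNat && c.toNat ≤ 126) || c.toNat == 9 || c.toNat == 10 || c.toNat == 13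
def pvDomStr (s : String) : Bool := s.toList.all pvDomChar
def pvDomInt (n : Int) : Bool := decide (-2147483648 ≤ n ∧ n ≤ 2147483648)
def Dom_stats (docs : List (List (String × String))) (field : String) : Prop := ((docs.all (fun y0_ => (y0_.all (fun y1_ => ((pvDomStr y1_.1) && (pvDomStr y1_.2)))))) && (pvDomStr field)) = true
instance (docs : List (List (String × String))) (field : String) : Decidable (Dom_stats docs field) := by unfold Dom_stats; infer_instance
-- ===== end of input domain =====

-- B replaces A's full sort of the length list by a single counting pass plus a sort of the
-- distinct lengths only (frequency table + cumulative scan for the percentiles); return values equal.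


-- ===== PORT A =====
-- len(doc.get(field) or "") — first-match dict lookup; "" is falsy
def pvLenA (field : String) (doc : List (String × String)) : Int :=
  let text := match (PySem.Dict.mk doc).get? field with
    | some t => if t = "" then "" else t
    | none => ""
  PySem.Str.len text

-- _fmt_num = f"{n:,}": thousands separators, inserted every 3 digits from the right
-- (only ever called with n ≥ 0 here, so no sign handling is reachable)
def pvGroup3A : List Char → List Char
  | a :: b :: c :: d :: rest => a :: b :: c :: ',' :: pvGroup3A (d :: rest)
  | l => l

def pvFmtA (n : Int) : String := String.ofList (pvGroup3A (PySem.Int.toChars n).reverse).reverse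

def stats (docs : List (List (String × String))) (field : String) : String :=
  let lengths := docs.foldl (fun acc doc => acc ++ [pvLenA field doc]) ([] : List Int)
  if lengths = [] then
    "docs: 0\nchars: 0\ntokens: ~0  (chars / 4)\nlengths: no docs found"
  else
    let count := PySem.List.len lengths
    let total_chars := lengths.sum
    let tokens := PySem.Int.floordiv total_chars 4
    -- min()/max() on a provably nonempty list: the .getD default is never used
    let min_len := (PySem.List.min? lengths (fun x => x)).getD 0
    let max_len := (PySem.List.max? lengths (fun x => x)).getD 0
    let mean_len := PySem.Int.floordiv total_chars count
    let sorted_lens := PySem.List.sorted lengths (fun x => x) false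
    -- sorted_lens[k]: the index is provably in range (0 ≤ k < len), so pyGetD's default is never used
    let p50 := PySem.List.pyGetD sorted_lens (PySem.Int.floordiv (PySem.List.len sorted_lens) 2) 0
    let p90 := PySem.List.pyGetD sorted_lens (PySem.Int.floordiv (PySem.List.len sorted_lens * 9) 10) 0
    "docs:    " ++ pvFmtA count ++
    "\nchars:   " ++ pvFmtA total_chars ++
    "\ntokens:  ~" ++ pvFmtA tokens ++ "  (chars / 4)" ++
    "\nlengths: min=" ++ pvFmtA min_len ++ "  mean=" ++ pvFmtA mean_len ++
    "  p50=" ++ pvFmtA p50 ++ "  p90=" ++ pvFmtA p90 ++ "  max=" ++ pvFmtA max_len ++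
    "\nformat:  jsonl  field: " ++ field

-- ===== PORT B =====
def pvLenB (field : String) (doc : List (String × String)) : Int :=
  let text := match (PySem.Dict.mk doc).get? field with
    | some t => if t = "" then "" else t
    | none => ""
  PySem.Str.len text

def pvGroup3B : List Char → List Char
  | a :: b :: c :: d :: rest => a :: b :: c :: ',' :: pvGroup3B (d :: rest)
  | l => l

def pvFmtB (n : Int) : String := String.ofList (pvGroup3B (PySem.Int.toChars n).reverse).reverse

-- loop body of B's single counting pass: count += 1; total += n; freq[n] = freq.get(n, 0) + 1
def pvAccStep (field : String) (s : Int × Int × PySem.Dict Int Int) (doc : List (String × String)) :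
    Int × Int × PySem.Dict Int Int :=
  let n := pvLenB field doc
  (s.1 + 1, s.2.1 + n, s.2.2.insert n (s.2.2.getD n 0 + 1))

-- loop body of B's cumulative scan over the sorted distinct lengths
def pvScanStep (freq : PySem.Dict Int Int) (i50 i90 : Int)
    (s : Int × Option Int × Option Int) (k : Int) : Int × Option Int × Option Int :=
  let cum := s.1 + freq.getD k 0
  (cum,
   if s.2.1 = none ∧ i50 < cum then some k else s.2.1,
   if s.2.2 = none ∧ i90 < cum then some k else s.2.2)

def stats_alt (docs : List (List (String × String))) (field : String) : String :=
  let st := docs.foldl (pvAccStep field) (0, 0, PySem.Dict.empty)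
  if st.1 = 0 then
    "docs: 0\nchars: 0\ntokens: ~0  (chars / 4)\nlengths: no docs found"
  else
    let ks := PySem.List.sorted st.2.2.keys (fun x => x) false
    -- ks[0] / ks[-1]: ks is provably nonempty here, defaults never used
    let min_len := PySem.List.pyGetD ks 0 0
    let max_len := PySem.List.pyGetD ks (-1) 0
    let i50 := PySem.Int.floordiv st.1 2
    let i90 := PySem.Int.floordiv (st.1 * 9) 10
    let r := ks.foldl (pvScanStep st.2.2 i50 i90) (0, none, none)
    -- p50/p90 are provably set by the scan (cum ends at count > i50, i90); .getD 0 never fires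
    let tokens := PySem.Int.floordiv st.2.1 4
    let mean_len := PySem.Int.floordiv st.2.1 st.1
    "docs:    " ++ pvFmtB st.1 ++
    "\nchars:   " ++ pvFmtB st.2.1 ++
    "\ntokens:  ~" ++ pvFmtB tokens ++ "  (chars / 4)" ++
    "\nlengths: min=" ++ pvFmtB min_len ++ "  mean=" ++ pvFmtB mean_len ++
    "  p50=" ++ pvFmtB (r.2.1.getD 0) ++ "  p90=" ++ pvFmtB (r.2.2.getD 0) ++ "  max=" ++ pvFmtB max_len ++
    "\nformat:  jsonl  field: " ++ field

-- ===== PRECONDITION & SPEC =====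
def Spec_stats (docs : List (List (String × String))) (field : String) (out : String) : Prop := out = stats_alt docs field
instance (docs : List (List (String × String))) (field : String) (out : String) : Decidable (Spec_stats docs field out) := by unfold Spec_stats; infer_instance

-- ===== CLAIM (what is proved, stated in full; the proofs are below) =====
def Claim_equal_stats : Prop := ∀ (docs : List (List (String × String))) (field : String), Dom_stats docs field → Spec_stats docs field (stats docs field)

-- ===== LEMMAS AND PROOFS =====

theorem pvLen_eq (field : String) (doc : List (String × String)) : pvLenB field doc = pvLenA field doc := rfl

theorem pvGroup3_eq : ∀ (l : List Char), pvGroup3B l = pvGroup3A l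
  | [] => rfl
  | [_] => rfl
  | [_, _] => rfl
  | [_, _, _] => rfl
  | a :: b :: c :: d :: rest => by
      rw [show pvGroup3A (a :: b :: c :: d :: rest) = a :: b :: c :: ',' :: pvGroup3A (d :: rest) from rfl,
          show pvGroup3B (a :: b :: c :: d :: rest) = a :: b :: c :: ',' :: pvGroup3B (d :: rest) from rfl,
          pvGroup3_eq (d :: rest)]

theorem pvFmt_eq (n : Int) : pvFmtB n = pvFmtA n := by simp [pvFmtA, pvFmtB, pvGroup3_eq]

-- B's counting pass, split into its three components
theorem accStep_eq (field : String) (docs : List (List (String × String))) :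
    ∀ (a b : Int) (d : PySem.Dict Int Int),
    docs.foldl (pvAccStep field) (a, b, d) =
      (a + docs.length, b + (docs.map (pvLenA field)).sum,
       (docs.map (pvLenA field)).foldl (fun d x => d.insert x (d.getD x 0 + 1)) d) := by
  induction docs with
  | nil => intro a b d; simp
  | cons doc t ih =>
      intro a b d
      simp only [List.foldl_cons, List.map_cons, List.sum_cons, ih, pvAccStep, pvLen_eq,
        List.length_cons, Prod.mk.injEq]
      exact ⟨by push_cast; ring, by ring, by simp⟩

-- the sorted distinct lengths
def pvKs (L : List Int) : List Int := PySem.List.sorted (PySem.Set.ofList L) (fun x => x) false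

-- sorted(L) laid out as the sorted distinct values, each repeated its multiplicity
def pvFlat (L : List Int) : List Int := (pvKs L).flatMap (fun k => List.replicate (L.count k) k)

theorem pvKs_def (L : List Int) :
    pvKs L = PySem.List.sorted (PySem.Set.ofList L) (fun x => x) false := rfl

theorem mem_pvKs (L : List Int) (v : Int) : v ∈ pvKs L ↔ v ∈ L := by
  rw [pvKs, PySem.List.mem_sorted, PySem.Set.mem_ofList]

theorem count_flat (ks : List Int) (c : Int → Nat) (hnd : ks.Nodup) (v : Int) :
    (ks.flatMap (fun k => List.replicate (c k) k)).count v = if v ∈ ks then c v else 0 := by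
  induction ks with
  | nil => simp
  | cons k t ih =>
      simp only [List.nodup_cons] at hnd
      simp only [List.flatMap_cons, List.count_append, ih hnd.2, List.count_replicate, List.mem_cons]
      by_cases hv : v = k
      · subst hv; simp [hnd.1]
      · simp [hv, Ne.symm hv]

theorem pvFlat_perm (L : List Int) : (pvFlat L).Perm L := by
  rw [List.perm_iff_count]
  intro v
  have hnd : (pvKs L).Nodup := (PySem.List.sorted_ofList_pairwise_lt L).imp (fun h => ne_of_lt h)
  rw [pvFlat, count_flat _ _ hnd v]
  by_cases hv : v ∈ pvKs L
  · simp [hv]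
  · rw [if_neg hv]
    exact (List.count_eq_zero.mpr (fun h => hv ((mem_pvKs L v).mpr h))).symm

theorem flat_pairwise_aux (c : Int → Nat) :
    ∀ ks : List Int, ks.Pairwise (· < ·) →
      (ks.flatMap (fun k => List.replicate (c k) k)).Pairwise (· ≤ ·) := by
  intro ks
  induction ks with
  | nil => intro _; simp
  | cons k t ih =>
      intro hp
      rw [List.pairwise_cons] at hp
      simp only [List.flatMap_cons, List.pairwise_append]
      refine ⟨List.pairwise_replicate.mpr (Or.inr le_rfl), ih hp.2, ?_⟩
      intro a ha b hb
      rw [List.eq_of_mem_replicate ha]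
      obtain ⟨k', hk', hb'⟩ := List.mem_flatMap.mp hb
      rw [List.eq_of_mem_replicate hb']
      exact le_of_lt (hp.1 k' hk')

theorem pvFlat_pairwise (L : List Int) : (pvFlat L).Pairwise (· ≤ ·) :=
  flat_pairwise_aux _ _ (PySem.List.sorted_ofList_pairwise_lt L)

theorem sorted_eq_pvFlat (L : List Int) :
    PySem.List.sorted L (fun x => x) false = pvFlat L :=
  PySem.List.sorted_id_eq_of_perm_of_pairwise L (pvFlat L) (pvFlat_perm L) (pvFlat_pairwise L)

-- the selection B's scan performs, as a recursion
def pvPick (c : Int → Int) : List Int → Int → Option Int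
  | [], _ => none
  | k :: t, j => if j < c k then some k else pvPick c t (j - c k)

-- the cumulative scan, characterized in one shot: each Option slot keeps its value once set,
-- and an empty slot receives the first k whose cumulative count passes the threshold (= pvPick)
theorem scan_full (freq : PySem.Dict Int Int) (i50 i90 : Int) :
    ∀ (ks : List Int) (a : Int) (o1 o2 : Option Int),
    ks.foldl (pvScanStep freq i50 i90) (a, o1, o2) =
      (a + (ks.map (fun k => freq.getD k 0)).sum,
       o1.or (pvPick (fun k => freq.getD k 0) ks (i50 - a)),
       o2.or (pvPick (fun k => freq.getD k 0) ks (i90 - a))) := by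
  intro ks
  induction ks with
  | nil => intro a o1 o2; simp [pvPick]
  | cons k t ih =>
      intro a o1 o2
      simp only [List.foldl_cons, pvScanStep, ih, List.map_cons, List.sum_cons, pvPick,
        Prod.mk.injEq]
      refine ⟨by ring, ?_, ?_⟩
      · cases o1 with
        | some v => simp
        | none =>
            by_cases h : i50 < a + freq.getD k 0
            · rw [if_pos (by simp [h]), if_pos (by omega)]; simp
            · rw [if_neg (by simp [h]), if_neg (by omega)]
              simp only [Option.none_or]
              congr 1
              ring
      · cases o2 with
        | some v => simp
        | none =>
            by_cases h : i90 < a + freq.getD k 0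
            · rw [if_pos (by simp [h]), if_pos (by omega)]; simp
            · rw [if_neg (by simp [h]), if_neg (by omega)]
              simp only [Option.none_or]
              congr 1
              ring

-- pvPick over positive weights is indexing into the replicated layout
theorem pvPick_flat (c : Int → Nat) :
    ∀ (ks : List Int) (j : Int), 0 ≤ j → (∀ k ∈ ks, 0 < c k) →
    pvPick (fun k => (c k : Int)) ks j =
      (ks.flatMap (fun k => List.replicate (c k) k))[j.toNat]? := by
  intro ks
  induction ks with
  | nil => intro j _ _; simp [pvPick]
  | cons k t ih =>
      intro j hj hc
      simp only [pvPick, List.flatMap_cons]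
      by_cases h : j < (c k : Int)
      · rw [if_pos h]
        rw [List.getElem?_append_left (by simp; omega)]
        simp [List.getElem?_replicate]
        omega
      · rw [if_neg h]
        rw [List.getElem?_append_right (by simp; omega)]
        rw [ih (j - c k) (by omega) (fun k' hk' => hc k' (List.mem_cons_of_mem _ hk'))]
        congr 1
        simp

theorem pvKs_ne_nil (L : List Int) (h : L ≠ []) : pvKs L ≠ [] := by
  intro hnil
  rcases List.exists_mem_of_ne_nil L h with ⟨x, hx⟩
  have : x ∈ pvKs L := (mem_pvKs L x).mpr hx
  simp [hnil] at this

-- min(L) is the head of the sorted distinct values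
theorem min_eq (L : List Int) (h : L ≠ []) :
    (PySem.List.min? L (fun x => x)).getD 0 = PySem.List.pyGetD (pvKs L) 0 0 := by
  cases hks : pvKs L with
  | nil => exact absurd hks (pvKs_ne_nil L h)
  | cons m t =>
      rw [PySem.List.pyGetD_zero]
      cases hm : PySem.List.min? L (fun x => x) with
      | none => exact absurd ((PySem.List.min?_eq_none_iff L _).mp hm) h
      | some m' =>
          simp only [Option.getD_some, List.getD_cons_zero]
          have h1 : m ≤ m' := by
            have := PySem.List.key_head_sorted_le (PySem.Set.ofList L) (fun x => x) hks
            exact this m' ((PySem.Set.mem_ofList L m').mpr (PySem.List.min?_mem hm))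
          have h2 : m' ≤ m := by
            have hmem : m ∈ pvKs L := by simp [hks]
            exact PySem.List.min?_isMin hm m ((mem_pvKs L m).mp hmem)
          omega

-- max(L) is the last of the sorted distinct values
theorem max_eq (L : List Int) (h : L ≠ []) :
    (PySem.List.max? L (fun x => x)).getD 0 = PySem.List.pyGetD (pvKs L) (-1) 0 := by
  have hks : pvKs L ≠ [] := pvKs_ne_nil L h
  rw [PySem.List.pyGetD_neg_one (pvKs L) 0 hks]
  cases hm : PySem.List.max? L (fun x => x) with
  | none =>
      exact absurd ((PySem.List.max?_eq_none_iff L _).mp hm) h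
  | some M =>
      simp only [Option.getD_some]
      have h1 : (pvKs L).getLast hks ≤ M :=
        PySem.List.max?_isMax hm _ ((mem_pvKs L _).mp (List.getLast_mem hks))
      have h2 : M ≤ (pvKs L).getLast hks := by
        have hMks : M ∈ pvKs L := (mem_pvKs L M).mpr (PySem.List.max?_mem hm)
        obtain ⟨i, hi, hMi⟩ := List.mem_iff_getElem.mp hMks
        have hlen1 : (pvKs L).length - 1 < (pvKs L).length := by
          have := List.length_pos_iff.mpr hks; omega
        have hmono := PySem.List.key_sorted_getElem_mono (PySem.Set.ofList L) (fun x => x)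
          (p := i) (q := (pvKs L).length - 1) (by omega) hlen1
        rw [List.getLast_eq_getElem]
        calc M = (pvKs L)[i] := hMi.symm
          _ ≤ _ := hmono
      omega

-- the sorted length list has length = |L|
theorem pvFlat_length (L : List Int) : (pvFlat L).length = L.length :=
  (pvFlat_perm L).length_eq

-- B's selection over the frequency table equals indexing the fully sorted list
theorem pick_eq (L : List Int) (j : Nat) (hj : j < L.length) :
    (pvPick (fun k => (PySem.Dict.counter L).getD k 0) (pvKs L) (j : Int)).getD 0 =
      PySem.List.pyGetD (PySem.List.sorted L (fun x => x) false) (j : Int) 0 := by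
  have hc : (fun k => (PySem.Dict.counter L).getD k 0) = (fun k => ((List.count k L : Nat) : Int)) := by
    funext k; exact PySem.Dict.getD_counter L k
  rw [hc, pvPick_flat (fun k => List.count k L) (pvKs L) j (by positivity)
    (fun k hk => List.count_pos_iff.mpr ((mem_pvKs L k).mp hk))]
  rw [PySem.List.pyGetD_eq_getElem _ 0 (by positivity) (by rw [PySem.List.length_sorted]; exact_mod_cast hj)]
  have hflat : (pvKs L).flatMap (fun k => List.replicate (List.count k L) k) = pvFlat L := rfl
  rw [hflat]
  have hjf : j < (pvFlat L).length := by rw [pvFlat_length]; exact hj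
  simp only [Int.toNat_natCast, List.getElem?_eq_getElem hjf, Option.getD_some]
  exact (List.getElem_of_eq (sorted_eq_pvFlat L) (by rw [PySem.List.length_sorted]; exact hj)).symm

-- ===== the main equivalence =====
theorem stats_eq (docs : List (List (String × String))) (field : String) :
    stats docs field = stats_alt docs field := by
  simp only [stats, stats_alt,
    PySem.List.foldl_append_singleton_eq_map (pvLenA field) docs [], List.nil_append,
    accStep_eq field docs 0 0 PySem.Dict.empty, zero_add,
    PySem.Dict.foldl_insert_getD_add_one_eq_counter, PySem.Dict.keys_counter]
  by_cases hd : docs = []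
  · subst hd; simp
  · have hL0 : docs.map (pvLenA field) ≠ [] := by simpa using hd
    have hn0 : ((docs.length : Int) ≠ 0) := by simpa using hd
    rw [if_neg hL0, if_neg hn0]
    simp only [pvFmt_eq, PySem.List.len_eq, List.length_map, PySem.List.length_sorted]
    rw [scan_full]
    simp only [Option.none_or, sub_zero]
    rw [← pvKs_def]
    rw [min_eq _ hL0, max_eq _ hL0]
    have hn : 0 < docs.length := List.length_pos_iff.mpr hd
    have hfd2 : PySem.Int.floordiv ((docs.length : Int)) 2 = ((docs.length / 2 : Nat) : Int) :=
      PySem.Int.floordiv_natCast _ 2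
    have hfd9 : PySem.Int.floordiv ((docs.length : Int) * 9) 10 = ((docs.length * 9 / 10 : Nat) : Int) := by
      rw [show ((docs.length : Int) * 9) = ((docs.length * 9 : Nat) : Int) by push_cast; ring]
      exact PySem.Int.floordiv_natCast _ 10
    rw [hfd2, hfd9, pick_eq _ _ (by rw [List.length_map]; omega), pick_eq _ _ (by rw [List.length_map]; omega)]

-- ===== VERDICT (by name: the statement is the Claim_ definition above) =====
theorem stats_spec : Claim_equal_stats := by
  intro docs field _
  unfold Spec_stats
  exact stats_eq docs field
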